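-- pv_equiv track=rewrite | github.com/nerds-coding/PythonCP | Backtracking/RatInMaze.py | ratMazeHelper
-- ===== SOURCE A (Python) =====
-- def isSafe(x, y, board, n):
--     return True if(x >= 0 and x < n) and (y >= 0 and y < n) and (board[x][y] == 1) else False
--
-- def ratMazeHelper(n, board, sol, x, y):
--     if(x == n-1) and (y == n-1) and (board[x][y] == 1):
--         sol[x][y] = 1
--         return True
--
--     if(isSafe(x,y,board,n)):
--         sol[x][y]=1
--
--         if(ratMazeHelper(n,board,sol,x+1,y)):
--             return True
--
--         if(ratMazeHelper(n,board,sol,x,y+1)):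
--             return True
--
--         sol[x][y]=0
--         return False
-- ===== SOURCE B (Python) =====
-- def ratMazeHelper(n, board, sol, x, y):
--     goal = x == n - 1 and y == n - 1 and board[x][y] == 1
--     safe = 0 <= x < n and 0 <= y < n and board[x][y] == 1
--     if not (goal or safe):
--         return None
--     if goal:
--         sol[x][y] = 1
--         return True
--     # bottom-up O(n^2) reachability: after row i, `below` is the reach row of row i
--     below = [False] * n
--     rows = []
--     for i in range(n - 1, x - 1, -1):
--         cur = []
--         right = False
--         for j in range(n - 1, -1, -1):
--             r = board[i][j] == 1 and ((i == n - 1 and j == n - 1) or below[j] or right)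
--             cur.append(r)
--             right = r
--         cur.reverse()
--         rows.append(cur)
--         below = cur
--     if not below[y]:
--         return False
--     # greedy down-first reconstruction of one path, marking sol (return value unaffected)
--     rows.reverse()
--     i, j = x, y
--     while True:
--         sol[i][j] = 1
--         if i == n - 1 and j == n - 1:
--             break
--         if i + 1 < n and rows[i + 1 - x][j]:
--             i += 1
--         else:
--             j += 1
--     return True
-- ===== Notes on version B (the rewrite author's own statement) =====
-- stated objective: faster
-- what changed: Replaces the exponential down/right backtracking recursion by an O(n^2) bottom-up row-by-row reachability DP plus a greedy down-first path reconstruction that marks sol.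
-- outside the precondition, e.g. on ratMazeHelper(2, [[1, 1], [0, 0], [7]], [[0, 0], [0, 0], [0]], 0, 0): A returns False, B returns False
import Mathlib
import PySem

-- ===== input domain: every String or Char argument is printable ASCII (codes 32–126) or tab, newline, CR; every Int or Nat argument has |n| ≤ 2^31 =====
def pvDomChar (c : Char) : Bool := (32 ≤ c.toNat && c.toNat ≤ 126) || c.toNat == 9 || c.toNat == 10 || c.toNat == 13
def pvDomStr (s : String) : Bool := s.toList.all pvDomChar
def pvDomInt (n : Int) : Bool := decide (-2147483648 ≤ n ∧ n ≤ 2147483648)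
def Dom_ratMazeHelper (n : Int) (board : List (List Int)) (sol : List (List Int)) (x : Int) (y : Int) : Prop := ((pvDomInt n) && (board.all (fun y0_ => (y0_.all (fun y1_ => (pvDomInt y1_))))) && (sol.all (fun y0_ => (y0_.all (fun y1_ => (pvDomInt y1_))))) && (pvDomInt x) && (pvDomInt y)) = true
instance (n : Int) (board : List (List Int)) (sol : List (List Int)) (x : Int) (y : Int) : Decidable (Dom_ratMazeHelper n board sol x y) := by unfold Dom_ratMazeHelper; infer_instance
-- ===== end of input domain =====

-- B replaces the exponential backtracking by an O(n^2) bottom-up reachability DP with greedy path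
-- reconstruction (objective: faster). Both Pythons mutate `sol` in place; the equivalence proved
-- here is about the RETURN value only (A additionally zeroes cells it explored and abandoned).

-- ===== PORT A =====
-- board[i][j] with Python index semantics; the default 0 is never reached on inputs Pre_ admits
def pvCell (board : List (List Int)) (i j : Int) : Int :=
  ((PySem.List.pyGet? board i).bind (fun r => PySem.List.pyGet? r j)).getD 0

def pvIsSafe (x y : Int) (board : List (List Int)) (n : Int) : Bool :=
  decide ((0 ≤ x ∧ x < n) ∧ (0 ≤ y ∧ y < n) ∧ pvCell board x y = 1)

-- literal port of A; the writes sol[x][y] = 1 / = 0 affect only `sol`, never the return value.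
-- The recursion is totalized by a fuel counter that the wrapper sets strictly above the
-- recursion depth (each recursive call decreases (n-x)+(n-y) by one), so fuel 0 is never hit.
def ratMazeHelperGo (fuel : Nat) (n : Int) (board : List (List Int)) (sol : List (List Int)) (x : Int) (y : Int) : Option Bool :=
  match fuel with
  | 0 => none
  | f + 1 =>
    if x = n - 1 ∧ y = n - 1 ∧ pvCell board x y = 1 then some true
    else if pvIsSafe x y board n then
      if (ratMazeHelperGo f n board sol (x + 1) y).getD false then some true
      else if (ratMazeHelperGo f n board sol x (y + 1)).getD false then some true
      else some false
    else none

def ratMazeHelper (n : Int) (board : List (List Int)) (sol : List (List Int)) (x : Int) (y : Int) : Option Bool :=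
  ratMazeHelperGo (((n - x) + (n - y)).toNat + 1) n board sol x y

-- ===== PORT B =====
-- body of Source B's inner loop: one cell of the reachability row (state = (cur, right))
def pvRowStep (n : Int) (board : List (List Int)) (below : List Bool) (i : Int)
    (st : List Bool × Bool) (j : Int) : List Bool × Bool :=
  let r : Bool := decide (pvCell board i j = 1) &&
      (decide (i = n - 1 ∧ j = n - 1) || PySem.List.pyGetD below j false || st.2)
  (st.1 ++ [r], r)

-- one iteration of Source B's outer loop: build row i right-to-left, then reverse it
def pvRow (n : Int) (board : List (List Int)) (below : List Bool) (i : Int) : List Bool :=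
  ((PySem.List.pyRange (n - 1) (-1) (-1)).foldl (pvRowStep n board below i) ([], false)).1.reverse

-- port of Source B (the sol-marking greedy reconstruction loop only mutates `sol` and is omitted here,
-- as are the sol writes; `rows` is kept in Source B only for that reconstruction)
def ratMazeHelper_alt (n : Int) (board : List (List Int)) (sol : List (List Int)) (x : Int) (y : Int) : Option Bool :=
  let goal : Bool := decide (x = n - 1 ∧ y = n - 1 ∧ pvCell board x y = 1)
  let safe : Bool := decide ((0 ≤ x ∧ x < n) ∧ (0 ≤ y ∧ y < n) ∧ pvCell board x y = 1)
  if !(goal || safe) then none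
  else if goal then some true
  else
    let below := (PySem.List.pyRange (n - 1) (x - 1) (-1)).foldl
        (fun b i => pvRow n board b i) (List.replicate n.toNat false)
    if !(PySem.List.pyGetD below y false) then some false else some true

-- ===== PRECONDITION & SPEC =====
-- Pre_ excludes exactly the raising corners: A (and B) raise IndexError when a maze/sol access
-- goes out of range, so Pre_ admits square n×n boards/sols, immediately-rejecting starts
-- (out of bounds or blocked, no recursion), and goal-hits whose two accessed cells exist;
-- on a few other ragged shapes every access happens to land and A still returns (see cites).
def Pre_ratMazeHelper (n : Int) (board : List (List Int)) (sol : List (List Int)) (x : Int) (y : Int) : Prop :=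
  (1 ≤ n ∧ (board.length : Int) = n ∧ (∀ r ∈ board, (r.length : Int) = n) ∧
     (sol.length : Int) = n ∧ (∀ r ∈ sol, (r.length : Int) = n))
  ∨ (¬(x = n - 1 ∧ y = n - 1) ∧ ¬((0 ≤ x ∧ x < n) ∧ (0 ≤ y ∧ y < n)))
  ∨ (((PySem.List.pyGet? board x).bind (fun r => PySem.List.pyGet? r y)).getD 1 ≠ 1)
  ∨ (x = n - 1 ∧ y = n - 1 ∧ ((PySem.List.pyGet? board x).bind (fun r => PySem.List.pyGet? r y)) = some 1 ∧
     ((PySem.List.pyGet? sol x).map (fun r => decide (PySem.Raise.InRange r.length y))).getD false = true)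

instance (n : Int) (board : List (List Int)) (sol : List (List Int)) (x : Int) (y : Int) : Decidable (Pre_ratMazeHelper n board sol x y) := by unfold Pre_ratMazeHelper; infer_instance

def pvWitness_ratMazeHelper : Int × List (List Int) × List (List Int) × Int × Int :=
  (2, [[1, 1], [0, 1]], [[0, 0], [0, 0]], 0, 0)

def Spec_ratMazeHelper (n : Int) (board : List (List Int)) (sol : List (List Int)) (x : Int) (y : Int) (out : Option Bool) : Prop := out = ratMazeHelper_alt n board sol x y
instance (n : Int) (board : List (List Int)) (sol : List (List Int)) (x : Int) (y : Int) (out : Option Bool) : Decidable (Spec_ratMazeHelper n board sol x y out) := by unfold Spec_ratMazeHelper; infer_instance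

-- ===== CLAIM (what is proved, stated in full; the proofs are below) =====
def Claim_equal_ratMazeHelper : Prop := ∀ (n : Int) (board : List (List Int)) (sol : List (List Int)) (x : Int) (y : Int), Dom_ratMazeHelper n board sol x y → Pre_ratMazeHelper n board sol x y → Spec_ratMazeHelper n board sol x y (ratMazeHelper n board sol x y)

-- ===== LEMMAS AND PROOFS =====

-- the fuel is irrelevant once it exceeds the recursion depth
theorem pvGo_congr (n : Int) (board : List (List Int)) (sol : List (List Int)) :
    ∀ (f g : Nat) (x y : Int), (n - x) + (n - y) < (f : Int) → (n - x) + (n - y) < (g : Int) →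
      ratMazeHelperGo f n board sol x y = ratMazeHelperGo g n board sol x y := by
  intro f
  induction f with
  | zero =>
    intro g x y hf hg
    have hng : ¬(x = n - 1 ∧ y = n - 1 ∧ pvCell board x y = 1) := by
      rintro ⟨h1, h2, -⟩; simp at hf; omega
    have hns : ¬(pvIsSafe x y board n = true) := by
      unfold pvIsSafe
      simp only [decide_eq_true_eq]
      rintro ⟨⟨h1, h2⟩, ⟨h3, h4⟩, -⟩; simp at hf; omega
    cases g with
    | zero => rfl
    | succ g' => simp [ratMazeHelperGo, hng, hns]
  | succ f' ih =>
    intro g x y hf hg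
    cases g with
    | zero =>
      have hng : ¬(x = n - 1 ∧ y = n - 1 ∧ pvCell board x y = 1) := by
        rintro ⟨h1, h2, -⟩; simp at hg; omega
      have hns : ¬(pvIsSafe x y board n = true) := by
        unfold pvIsSafe
        simp only [decide_eq_true_eq]
        rintro ⟨⟨h1, h2⟩, ⟨h3, h4⟩, -⟩; simp at hg; omega
      simp [ratMazeHelperGo, hng, hns]
    | succ g' =>
      conv_lhs => rw [ratMazeHelperGo]
      conv_rhs => rw [ratMazeHelperGo]
      by_cases hgoal : x = n - 1 ∧ y = n - 1 ∧ pvCell board x y = 1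
      · rw [if_pos hgoal, if_pos hgoal]
      · rw [if_neg hgoal, if_neg hgoal]
        by_cases hs : pvIsSafe x y board n = true
        · rw [if_pos hs, if_pos hs]
          have hb := of_decide_eq_true (id (pvIsSafe.eq_def x y board n ▸ hs))
          obtain ⟨⟨h1, h2⟩, ⟨h3, h4⟩, -⟩ := hb
          have e1 := ih f' (x + 1) y (by push_cast at hf ⊢; omega) (by push_cast at hf ⊢; omega)
          have e2 := ih f' x (y + 1) (by push_cast at hf ⊢; omega) (by push_cast at hf ⊢; omega)
          have e1' := ih g' (x + 1) y (by push_cast at hf ⊢; omega) (by push_cast at hg ⊢; omega)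
          have e2' := ih g' x (y + 1) (by push_cast at hf ⊢; omega) (by push_cast at hg ⊢; omega)
          rw [← e1', ← e2']
        · rw [if_neg hs, if_neg hs]

-- one-step unfolding of A's recursion at the wrapper's fuel
theorem pvA_unfold (n : Int) (board : List (List Int)) (sol : List (List Int)) (x y : Int) :
    ratMazeHelper n board sol x y =
      (if x = n - 1 ∧ y = n - 1 ∧ pvCell board x y = 1 then some true
       else if pvIsSafe x y board n then
         if (ratMazeHelper n board sol (x + 1) y).getD false then some true
         else if (ratMazeHelper n board sol x (y + 1)).getD false then some true
         else some false
       else none) := by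
  unfold ratMazeHelper
  conv_lhs => rw [ratMazeHelperGo]
  by_cases hgoal : x = n - 1 ∧ y = n - 1 ∧ pvCell board x y = 1
  · rw [if_pos hgoal, if_pos hgoal]
  · rw [if_neg hgoal, if_neg hgoal]
    by_cases hs : pvIsSafe x y board n = true
    · rw [if_pos hs, if_pos hs]
      have hb := of_decide_eq_true (id (pvIsSafe.eq_def x y board n ▸ hs))
      obtain ⟨⟨h1, h2⟩, ⟨h3, h4⟩, -⟩ := hb
      have e1 := pvGo_congr n board sol (((n - x) + (n - y)).toNat)
          (((n - (x + 1)) + (n - y)).toNat + 1) (x + 1) y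
          (by push_cast; omega) (by push_cast; omega)
      have e2 := pvGo_congr n board sol (((n - x) + (n - y)).toNat)
          (((n - x) + (n - (y + 1))).toNat + 1) x (y + 1)
          (by push_cast; omega) (by push_cast; omega)
      rw [e1, e2]
    · rw [if_neg hs, if_neg hs]

-- one-step characterisation of A's (truthy) result: the down/right reachability recurrence
theorem pvT_rec (n : Int) (board : List (List Int)) (sol : List (List Int)) (hn : 1 ≤ n) (i j : Int) :
    (ratMazeHelper n board sol i j).getD false =
      (decide ((0 ≤ i ∧ i < n) ∧ (0 ≤ j ∧ j < n) ∧ pvCell board i j = 1) &&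
        (decide (i = n - 1 ∧ j = n - 1) ||
          (ratMazeHelper n board sol (i + 1) j).getD false ||
          (ratMazeHelper n board sol i (j + 1)).getD false)) := by
  conv_lhs => rw [pvA_unfold n board sol i j]
  by_cases hg : i = n - 1 ∧ j = n - 1 ∧ pvCell board i j = 1
  · obtain ⟨e1, e2, hc⟩ := hg
    subst e1; subst e2
    rw [if_pos ⟨rfl, rfl, hc⟩]
    have hd : decide ((0 ≤ n - 1 ∧ n - 1 < n) ∧ (0 ≤ n - 1 ∧ n - 1 < n) ∧ pvCell board (n - 1) (n - 1) = 1) = true :=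
      decide_eq_true ⟨⟨by omega, by omega⟩, ⟨by omega, by omega⟩, hc⟩
    simp [hd]
    exact ⟨hn, hc⟩
  · rw [if_neg hg]
    by_cases hs : pvIsSafe i j board n = true
    · rw [if_pos hs]
      unfold pvIsSafe at hs
      have hs' := of_decide_eq_true hs
      have hng : decide (i = n - 1 ∧ j = n - 1) = false :=
        decide_eq_false (fun h => hg ⟨h.1, h.2, hs'.2.2⟩)
      rw [hs, hng]
      cases h1 : (ratMazeHelper n board sol (i + 1) j).getD false <;>
        cases h2 : (ratMazeHelper n board sol i (j + 1)).getD false <;> simp [h1, h2]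
    · rw [if_neg hs]
      unfold pvIsSafe at hs
      simp only [decide_eq_true_eq] at hs
      simp [hs]

theorem pvT_oob (n : Int) (board : List (List Int)) (sol : List (List Int)) (hn : 1 ≤ n) (i j : Int)
    (h : ¬((0 ≤ i ∧ i < n) ∧ (0 ≤ j ∧ j < n))) :
    (ratMazeHelper n board sol i j).getD false = false := by
  rw [pvT_rec n board sol hn i j]
  have hd : decide ((0 ≤ i ∧ i < n) ∧ (0 ≤ j ∧ j < n) ∧ pvCell board i j = 1) = false :=
    decide_eq_false (fun hh => h ⟨hh.1, hh.2.1⟩)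
  simp [hd]

-- a list `b` represents (the truthy value of) A on row i at columns 0..n-1
def pvRep (n : Int) (board : List (List Int)) (sol : List (List Int)) (b : List Bool) (i : Int) : Prop :=
  ∀ j : Int, 0 ≤ j → j < n → PySem.List.pyGetD b j false = (ratMazeHelper n board sol i j).getD false

-- inner fold: processing columns j0 down to 0 appends exactly A's truthy values, right to left
theorem pvInner_fold (n : Int) (board : List (List Int)) (sol : List (List Int)) (hn : 1 ≤ n)
    (below : List Bool) (i : Int) (hi : 0 ≤ i ∧ i < n) (hb : pvRep n board sol below (i + 1)) :
    ∀ (k : Nat) (j0 : Int), j0 + 1 = (k : Int) → j0 < n → ∀ acc : List Bool,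
      (PySem.List.pyRange j0 (-1) (-1)).foldl (pvRowStep n board below i)
          (acc, (ratMazeHelper n board sol i (j0 + 1)).getD false) =
        (acc ++ (PySem.List.pyRange j0 (-1) (-1)).map
            (fun j => (ratMazeHelper n board sol i j).getD false),
         (ratMazeHelper n board sol i 0).getD false) := by
  intro k
  induction k with
  | zero =>
    intro j0 h0 _ acc
    have : j0 = -1 := by omega
    subst this
    rw [PySem.List.pyRange_neg_one_eq_nil (by omega)]
    simp
  | succ m ih =>
    intro j0 h0 hlt acc
    have hj0 : 0 ≤ j0 := by omega
    rw [PySem.List.pyRange_neg_one_cons (by omega : (-1 : Int) < j0)]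
    simp only [List.foldl_cons, List.map_cons]
    have hdc : decide ((0 ≤ i ∧ i < n) ∧ (0 ≤ j0 ∧ j0 < n) ∧ pvCell board i j0 = 1) =
        decide (pvCell board i j0 = 1) := by
      by_cases hc : pvCell board i j0 = 1 <;> simp [hc, hi.1, hi.2, hj0, hlt]
    have hr : (pvRowStep n board below i (acc, (ratMazeHelper n board sol i (j0 + 1)).getD false) j0) =
        (acc ++ [(ratMazeHelper n board sol i j0).getD false],
         (ratMazeHelper n board sol i j0).getD false) := by
      simp only [pvRowStep, hb j0 hj0 hlt]
      rw [pvT_rec n board sol hn i j0, hdc]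
    rw [hr]
    have h2 := ih (j0 - 1) (by omega) (by omega) (acc ++ [(ratMazeHelper n board sol i j0).getD false])
    rw [show j0 - 1 + 1 = j0 by ring] at h2
    rw [h2]
    simp

-- hence one outer iteration turns a representation of row i+1 into one of row i
theorem pvRow_rep (n : Int) (board : List (List Int)) (sol : List (List Int)) (hn : 1 ≤ n)
    (below : List Bool) (i : Int) (hi : 0 ≤ i ∧ i < n) (hb : pvRep n board sol below (i + 1)) :
    pvRep n board sol (pvRow n board below i) i := by
  unfold pvRow
  have hoob : (ratMazeHelper n board sol i ((n - 1) + 1)).getD false = false :=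
    pvT_oob n board sol hn i (n - 1 + 1) (by intro h; omega)
  have h := pvInner_fold n board sol hn below i hi hb n.toNat (n - 1) (by omega) (by omega) []
  rw [hoob] at h
  rw [h]
  simp only [List.nil_append]
  intro j hj0 hjn
  rw [PySem.List.pyRange_neg_one_eq_reverse]
  simp only [List.map_reverse, List.reverse_reverse]
  have : (-1 : Int) + 1 = 0 := by ring
  rw [this, show n - 1 + 1 = n by ring]
  exact PySem.List.pyGetD_map_pyRange_of_nonneg _ n j false hj0 hjn

-- the outer fold carries the representation from the all-false row n down to row x
theorem pvOuter_fold (n : Int) (board : List (List Int)) (sol : List (List Int)) (hn : 1 ≤ n)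
    (x : Int) (hx : 0 ≤ x) :
    ∀ (k : Nat) (i0 : Int), i0 - (x - 1) = (k : Int) → i0 < n → ∀ below : List Bool,
      pvRep n board sol below (i0 + 1) →
      pvRep n board sol
        ((PySem.List.pyRange i0 (x - 1) (-1)).foldl (fun b i => pvRow n board b i) below) x := by
  intro k
  induction k with
  | zero =>
    intro i0 h0 _ below hb
    have : i0 = x - 1 := by omega
    subst this
    rw [PySem.List.pyRange_neg_one_eq_nil (by omega)]
    simpa using hb
  | succ m ih =>
    intro i0 h0 hlt below hb
    rw [PySem.List.pyRange_neg_one_cons (by omega : x - 1 < i0)]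
    simp only [List.foldl_cons]
    have hrep := pvRow_rep n board sol hn below i0 ⟨by omega, hlt⟩ hb
    have := ih (i0 - 1) (by omega) (by omega) (pvRow n board below i0)
      (by rw [show i0 - 1 + 1 = i0 by ring]; exact hrep)
    exact this

-- the initial row [False]*n represents row n (everything below the maze is unreachable)
theorem pvInit_rep (n : Int) (board : List (List Int)) (sol : List (List Int)) (hn : 1 ≤ n) :
    pvRep n board sol (List.replicate n.toNat false) n := by
  intro j hj0 hjn
  rw [pvT_oob n board sol hn n j (by intro h; omega)]
  rw [PySem.List.pyGetD_eq_getElem _ _ hj0 (by simp; omega)]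
  simp

-- A equals B on every input (Pre_ is where both Pythons return rather than raise)
theorem pv_total_eq (n : Int) (board : List (List Int)) (sol : List (List Int)) (x y : Int) :
    ratMazeHelper n board sol x y = ratMazeHelper_alt n board sol x y := by
  unfold ratMazeHelper_alt
  by_cases hg : x = n - 1 ∧ y = n - 1 ∧ pvCell board x y = 1
  · obtain ⟨e1, e2, hc⟩ := hg
    subst e1; subst e2
    rw [pvA_unfold n board sol (n - 1) (n - 1)]
    rw [if_pos ⟨rfl, rfl, hc⟩]
    simp [hc]
  · by_cases hs : (0 ≤ x ∧ x < n) ∧ (0 ≤ y ∧ y < n) ∧ pvCell board x y = 1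
    · have hn : 1 ≤ n := by omega
      simp only [hg, hs, decide_true, decide_false, Bool.false_or, Bool.or_true,
        Bool.not_true, Bool.false_eq_true, if_false]
      have hrep := pvOuter_fold n board sol hn x hs.1.1 (n - 1 - (x - 1)).toNat (n - 1)
        (by omega) (by omega) (List.replicate n.toNat false)
        (by rw [show n - 1 + 1 = n by ring]; exact pvInit_rep n board sol hn)
      rw [hrep y hs.2.1.1 hs.2.1.2]
      conv_lhs => rw [pvA_unfold n board sol x y]
      rw [if_neg hg, if_pos (by simp [pvIsSafe]; exact ⟨⟨hs.1.1, hs.1.2⟩, ⟨hs.2.1.1, hs.2.1.2⟩, hs.2.2⟩)]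
      rw [pvT_rec n board sol hn x y]
      have hng : decide (x = n - 1 ∧ y = n - 1) = false := by
        simp; intro h1 h2; exact absurd ⟨h1, h2, hs.2.2⟩ hg
      simp [hs.1.1, hs.1.2, hs.2.1.1, hs.2.1.2, hs.2.2, hng]
      split_ifs <;> simp_all
    · rw [pvA_unfold n board sol x y]
      rw [if_neg hg, if_neg (by simp [pvIsSafe]; intro h1 h2 h3 h4 hc; exact hs ⟨⟨h1, h2⟩, ⟨h3, h4⟩, hc⟩)]
      simp [hg, hs]

-- ===== VERDICT (by name: the statement is the Claim_ definition above) =====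
theorem ratMazeHelper_spec : Claim_equal_ratMazeHelper := by
  intro n board sol x y _ _
  unfold Spec_ratMazeHelper
  exact pv_total_eq n board sol x y
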